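-- pv_equiv track=rewrite | github.com/Arteok/UTN-TUPaD-P1 | Trabajos Integradores/TP2_Matematica/TP2_Matematica.py | hay_conjuntos_completamente_diferentes
-- ===== SOURCE A (Python) =====
-- def hay_conjuntos_completamente_diferentes(conjuntos):
--     claves = list(conjuntos.keys())
--     resultados = []
--     for i in range(len(claves)):
--         for j in range(i + 1, len(claves)):
--             c1, c2 = claves[i], claves[j]
--             if conjuntos[c1].isdisjoint(conjuntos[c2]):
--                 resultados.append((c1, c2))
--     return resultados
-- ===== SOURCE B (Python) =====
-- def hay_conjuntos_completamente_diferentes(conjuntos):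
--     items = list(conjuntos.items())
--     # inverted index: element -> list of item positions whose set contains it
--     index = {}
--     for i, (k, s) in enumerate(items):
--         for e in s:
--             index.setdefault(e, []).append(i)
--     # conflict: unordered (as i<j) position pairs that share some element
--     conflict = set()
--     for lst in index.values():
--         for a in range(len(lst)):
--             for b in range(a + 1, len(lst)):
--                 conflict.add((lst[a], lst[b]))
--     resultados = []
--     for i in range(len(items)):
--         for j in range(i + 1, len(items)):
--             if (i, j) not in conflict:
--                 resultados.append((items[i][0], items[j][0]))
--     return resultados
-- ===== Notes on version B (the rewrite author's own statement) =====
-- stated objective: alternative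
-- what changed: Replaces the pairwise isdisjoint scan with an inverted index (element -> positions) from which a set of conflicting (non-disjoint) position pairs is built once; the i<j emission loop then only tests membership in that conflict set.
import Mathlib
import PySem

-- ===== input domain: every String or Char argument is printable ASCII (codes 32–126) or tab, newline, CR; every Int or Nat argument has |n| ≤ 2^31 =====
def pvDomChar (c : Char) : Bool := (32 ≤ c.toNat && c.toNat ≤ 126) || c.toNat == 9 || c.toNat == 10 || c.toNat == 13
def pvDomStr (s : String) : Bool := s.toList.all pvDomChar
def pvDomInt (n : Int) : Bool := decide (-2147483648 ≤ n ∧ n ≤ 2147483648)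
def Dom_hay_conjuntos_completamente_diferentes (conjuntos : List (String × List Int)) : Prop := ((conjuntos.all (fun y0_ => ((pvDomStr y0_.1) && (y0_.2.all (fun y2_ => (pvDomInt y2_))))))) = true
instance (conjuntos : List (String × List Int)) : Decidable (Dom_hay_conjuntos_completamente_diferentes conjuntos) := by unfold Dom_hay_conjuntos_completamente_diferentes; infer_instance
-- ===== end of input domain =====

-- B replaces the pairwise isdisjoint scan by an inverted index (element -> positions) and a
-- precomputed set of conflicting position pairs (objective: alternative algorithm, same cost class).

-- ===== PORT A =====
-- hand port of Python set.isdisjoint on the distinct-element list representation (exact: no common element)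
def pyIsdisjoint (a b : List Int) : Bool := a.all (fun e => !(b.contains e))

def hay_conjuntos_completamente_diferentes (conjuntos : List (String × List Int)) : List (String × String) :=
  let d := PySem.Dict.mk conjuntos
  let claves := d.keys
  (PySem.List.pyRange 0 (claves.length : Int) 1).foldl (fun resultados i =>
    (PySem.List.pyRange (i + 1) (claves.length : Int) 1).foldl (fun resultados j =>
      -- claves[i] / claves[j] are always in range here, so pyGetD is exact
      let c1 := PySem.List.pyGetD claves i ""
      let c2 := PySem.List.pyGetD claves j ""
      -- conjuntos[c1] / conjuntos[c2]: the keys come from d, so the lookup never raises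
      if pyIsdisjoint (d.getD c1 []) (d.getD c2 []) then resultados ++ [(c1, c2)]
      else resultados) resultados) []

-- ===== PORT B =====
def hay_conjuntos_completamente_diferentes_alt (conjuntos : List (String × List Int)) : List (String × String) :=
  let items := (PySem.Dict.mk conjuntos).items
  -- inverted index: element -> list of item positions whose set contains it
  let index := (PySem.List.enumerate items 0).foldl (fun ind p =>
      p.2.2.foldl (fun ind e => ind.modify e ([] : List Int) (· ++ [p.1])) ind) PySem.Dict.empty
  -- conflict: position pairs (i, j) that share some element
  let conflict := index.values.foldl (fun cf lst =>
      (PySem.List.pyRange 0 (lst.length : Int) 1).foldl (fun cf a =>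
        (PySem.List.pyRange (a + 1) (lst.length : Int) 1).foldl (fun cf b =>
          PySem.Set.add cf (PySem.List.pyGetD lst a 0, PySem.List.pyGetD lst b 0)) cf) cf)
    ([] : PySem.Set (Int × Int))
  (PySem.List.pyRange 0 (items.length : Int) 1).foldl (fun resultados i =>
    (PySem.List.pyRange (i + 1) (items.length : Int) 1).foldl (fun resultados j =>
      if !(PySem.Set.contains conflict (i, j)) then
        resultados ++ [((PySem.List.pyGetD items i ("", [])).1, (PySem.List.pyGetD items j ("", [])).1)]
      else resultados) resultados) []

-- ===== PRECONDITION & SPEC =====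
-- The argument is a Python dict whose values are Python sets; Pre_ excludes the association lists
-- that represent no such value (duplicate keys, or duplicate elements inside a value list).
def Pre_hay_conjuntos_completamente_diferentes (conjuntos : List (String × List Int)) : Prop :=
  (conjuntos.map Prod.fst).Nodup ∧ ∀ p ∈ conjuntos, p.2.Nodup
instance (conjuntos : List (String × List Int)) : Decidable (Pre_hay_conjuntos_completamente_diferentes conjuntos) := by unfold Pre_hay_conjuntos_completamente_diferentes; infer_instance

def pvWitness_hay_conjuntos_completamente_diferentes : (List (String × List Int)) :=
  [("a", [1, 2]), ("b", [3]), ("c", [2, 5])]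

def Spec_hay_conjuntos_completamente_diferentes (conjuntos : List (String × List Int)) (out : List (String × String)) : Prop := out = hay_conjuntos_completamente_diferentes_alt conjuntos
instance (conjuntos : List (String × List Int)) (out : List (String × String)) : Decidable (Spec_hay_conjuntos_completamente_diferentes conjuntos out) := by unfold Spec_hay_conjuntos_completamente_diferentes; infer_instance

-- ===== CLAIM (what is proved, stated in full; the proofs are below) =====
def Claim_equal_hay_conjuntos_completamente_diferentes : Prop := ∀ (conjuntos : List (String × List Int)), Dom_hay_conjuntos_completamente_diferentes conjuntos → Pre_hay_conjuntos_completamente_diferentes conjuntos → Spec_hay_conjuntos_completamente_diferentes conjuntos (hay_conjuntos_completamente_diferentes conjuntos)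

-- ===== LEMMAS AND PROOFS =====

-- the index dict of port B, named for the proofs (definitionally the `index` let of the port)
def pvIndex (c : List (String × List Int)) : PySem.Dict Int (List Int) :=
  (PySem.List.enumerate c 0).foldl (fun ind p =>
    p.2.2.foldl (fun ind e => ind.modify e ([] : List Int) (· ++ [p.1])) ind) PySem.Dict.empty

def pvConflict (c : List (String × List Int)) : PySem.Set (Int × Int) :=
  (pvIndex c).values.foldl (fun cf lst =>
      (PySem.List.pyRange 0 (lst.length : Int) 1).foldl (fun cf a =>
        (PySem.List.pyRange (a + 1) (lst.length : Int) 1).foldl (fun cf b =>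
          PySem.Set.add cf (PySem.List.pyGetD lst a 0, PySem.List.pyGetD lst b 0)) cf) cf)
    ([] : PySem.Set (Int × Int))

-- the posting list of element e: positions (in order) whose set contains e
def pvPost (c : List (String × List Int)) (e : Int) : List Int :=
  ((PySem.List.enumerate c 0).filter (fun p => p.2.2.contains e)).map (·.1)

lemma filter_beq_of_nodup (s : List Int) (e : Int) (h : s.Nodup) :
    s.filter (fun x => x == e) = if e ∈ s then [e] else [] := by
  induction s with
  | nil => simp
  | cons x s ih =>
    simp only [List.nodup_cons] at h
    by_cases hx : x = e
    · subst hx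
      simp [ih h.2, h.1]
    · simp [hx, ih h.2, Ne.symm hx]

lemma getD_inner (s : List Int) (i : Int) (d : PySem.Dict Int (List Int)) (e : Int) (hs : s.Nodup) :
    (s.foldl (fun d x => d.modify x ([] : List Int) (· ++ [i])) d).getD e []
      = d.getD e [] ++ (if e ∈ s then [i] else []) := by
  have h1 : s.foldl (fun d x => d.modify x ([] : List Int) (· ++ [i])) d
      = (s.map (fun x => (x, i))).foldl (fun d p => d.modify p.1 ([] : List Int) (· ++ [p.2])) d := by
    rw [List.foldl_map]
  rw [h1, PySem.Dict.getD_foldl_modify_append]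
  congr 1
  rw [List.filter_map]
  have h2 : ((fun p : Int × Int => p.1 == e) ∘ (fun x => (x, i))) = (fun x => x == e) := rfl
  rw [h2, filter_beq_of_nodup s e hs]
  by_cases he : e ∈ s <;> simp [he]

lemma getD_indexFold (L : List (Int × (String × List Int))) (d : PySem.Dict Int (List Int)) (e : Int)
    (h : ∀ p ∈ L, p.2.2.Nodup) :
    (L.foldl (fun ind p => p.2.2.foldl (fun ind x => ind.modify x ([] : List Int) (· ++ [p.1])) ind) d).getD e []
      = d.getD e [] ++ (L.filter (fun p => p.2.2.contains e)).map (·.1) := by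
  induction L generalizing d with
  | nil => simp
  | cons p L ih =>
    simp only [List.foldl_cons]
    rw [ih _ (fun q hq => h q (List.mem_cons_of_mem _ hq))]
    rw [getD_inner _ _ _ _ (h p (List.mem_cons_self))]
    by_cases he : e ∈ p.2.2
    · simp [he]
    · simp [he]

lemma index_getD (c : List (String × List Int)) (h : ∀ p ∈ c, p.2.Nodup) (e : Int) :
    (pvIndex c).getD e [] = pvPost c e := by
  unfold pvIndex pvPost
  rw [getD_indexFold]
  · simp
  · intro p hp
    rw [PySem.List.mem_enumerate_iff] at hp
    obtain ⟨k, hk, rfl⟩ := hp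
    exact h _ (List.getElem_mem hk)

lemma mem_post (c : List (String × List Int)) (e : Int) (i : Int) :
    i ∈ pvPost c e ↔ 0 ≤ i ∧ i < (c.length : Int) ∧ e ∈ (c.getD i.toNat ("", [])).2 := by
  unfold pvPost
  constructor
  · intro hi2
    obtain ⟨p, hpf, hp1⟩ := List.mem_map.mp hi2
    obtain ⟨hpe, hpc⟩ := List.mem_filter.mp hpf
    obtain ⟨k, hk, rfl⟩ := (PySem.List.mem_enumerate_iff _ _ _).mp hpe
    simp only [zero_add] at hp1 hpc
    subst hp1
    refine ⟨Int.natCast_nonneg k, by exact_mod_cast hk, ?_⟩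
    rw [Int.toNat_natCast, List.getD_eq_getElem _ _ hk]
    simpa using hpc
  · rintro ⟨h0, hlt, he⟩
    have hk : i.toNat < c.length := by omega
    apply List.mem_map.mpr
    refine ⟨((i.toNat : Int), c.getD i.toNat ("", [])), List.mem_filter.mpr ⟨?_, ?_⟩,
      by simpa using Int.toNat_of_nonneg h0⟩
    · exact (PySem.List.mem_enumerate_iff _ _ _).mpr
        ⟨i.toNat, hk, by simp [List.getElem?_eq_getElem hk]⟩
    · simpa using he

lemma sorted_post (c : List (String × List Int)) (e : Int) :
    (pvPost c e).Pairwise (· < ·) := by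
  unfold pvPost
  exact ((PySem.List.pairwise_lt_enumerate c 0).filter _).map _ (fun _ _ h => h)

lemma index_keys_fold_nodup (L : List (Int × (String × List Int))) (d : PySem.Dict Int (List Int))
    (hd : d.keys.Nodup) :
    (L.foldl (fun ind p => p.2.2.foldl (fun ind x => ind.modify x ([] : List Int) (· ++ [p.1])) ind) d).keys.Nodup := by
  induction L generalizing d with
  | nil => exact hd
  | cons p L ih =>
    simp only [List.foldl_cons]
    exact ih _ (PySem.Dict.nodup_keys_foldl_modify_key p.2.2 id [] (fun _ _ => (· ++ [p.1])) d hd)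

lemma index_keys_nodup (c : List (String × List Int)) : (pvIndex c).keys.Nodup :=
  index_keys_fold_nodup _ _ (by simp [PySem.Dict.keys_empty])

lemma values_mem_iff (c : List (String × List Int)) (h : ∀ p ∈ c, p.2.Nodup)
    {lst : List Int} (hm : lst ∈ (pvIndex c).values) : ∃ e, lst = pvPost c e := by
  have : ∃ p ∈ (pvIndex c).items, p.2 = lst := by
    simpa [PySem.Dict.values, List.mem_map] using hm
  obtain ⟨⟨e, v⟩, hp, rfl⟩ := this
  refine ⟨e, ?_⟩
  rw [← index_getD c h e]
  exact (PySem.Dict.getD_of_mem_items _ hp (index_keys_nodup c) []).symm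

lemma post_mem_values (c : List (String × List Int)) (h : ∀ p ∈ c, p.2.Nodup) (e : Int)
    (hne : pvPost c e ≠ []) : pvPost c e ∈ (pvIndex c).values := by
  cases hc : (pvIndex c).contains e with
  | false =>
    exact absurd ((index_getD c h e).symm.trans (PySem.Dict.getD_of_not_contains _ _ hc)) hne
  | true =>
    have hs : ((pvIndex c).get? e).isSome := by
      rw [← PySem.Dict.contains_eq_isSome_get?, hc]
    obtain ⟨v, hv⟩ := Option.isSome_iff_exists.mp hs
    have hgd : (pvIndex c).getD e [] = v := PySem.Dict.getD_of_get?_eq_some _ _ hv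
    have : (e, pvPost c e) ∈ (pvIndex c).items := by
      rw [← index_getD c h e, hgd]
      exact PySem.Dict.mem_items_of_get?_eq_some _ hv
    show pvPost c e ∈ (pvIndex c).items.map (·.2)
    exact List.mem_map.mpr ⟨(e, pvPost c e), this, rfl⟩

lemma mem_foldl_grow {β γ : Type} (F : List γ → β → List γ) (Q : β → γ → Prop) (x : γ)
    (hF : ∀ cf b, x ∈ F cf b ↔ x ∈ cf ∨ Q b x) :
    ∀ (L : List β) (cf : List γ), x ∈ L.foldl F cf ↔ x ∈ cf ∨ ∃ b ∈ L, Q b x := by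
  intro L
  induction L with
  | nil => simp
  | cons b L ih =>
    intro cf
    simp only [List.foldl_cons, ih, hF]
    constructor
    · rintro (⟨h | h⟩ | ⟨b', hb', h⟩)
      · exact Or.inl h
      · exact Or.inr ⟨b, List.mem_cons_self, h⟩
      · exact Or.inr ⟨b', List.mem_cons_of_mem _ hb', h⟩
    · rintro (h | ⟨b', hb', h⟩)
      · exact Or.inl (Or.inl h)
      · rcases List.mem_cons.mp hb' with rfl | hb'
        · exact Or.inl (Or.inr h)
        · exact Or.inr ⟨b', hb', h⟩

lemma mem_conflict (c : List (String × List Int)) (x : Int × Int) :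
    x ∈ pvConflict c ↔ ∃ lst ∈ (pvIndex c).values, ∃ a, (0 ≤ a ∧ a < (lst.length : Int)) ∧
      ∃ b, (a + 1 ≤ b ∧ b < (lst.length : Int)) ∧
        x = (PySem.List.pyGetD lst a 0, PySem.List.pyGetD lst b 0) := by
  unfold pvConflict
  rw [mem_foldl_grow _ (fun lst x => ∃ a, (0 ≤ a ∧ a < (lst.length : Int)) ∧
      ∃ b, (a + 1 ≤ b ∧ b < (lst.length : Int)) ∧
        x = (PySem.List.pyGetD lst a 0, PySem.List.pyGetD lst b 0)) x]
  · simp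
  · intro cf lst
    rw [mem_foldl_grow _ (fun a x => ∃ b, (a + 1 ≤ b ∧ b < (lst.length : Int)) ∧
        x = (PySem.List.pyGetD lst a 0, PySem.List.pyGetD lst b 0)) x]
    · simp [PySem.List.mem_pyRange_one]
    · intro cf' a
      rw [PySem.Set.mem_foldl_add]
      simp [PySem.List.mem_pyRange_one]

lemma pair_mem_sorted (lst : List Int) (hs : lst.Pairwise (· < ·)) (i j : Int) (hij : i < j) :
    (∃ a, (0 ≤ a ∧ a < (lst.length : Int)) ∧ ∃ b, (a + 1 ≤ b ∧ b < (lst.length : Int)) ∧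
      ((i, j) : Int × Int) = (PySem.List.pyGetD lst a 0, PySem.List.pyGetD lst b 0))
    ↔ (i ∈ lst ∧ j ∈ lst) := by
  rw [List.pairwise_iff_getElem] at hs
  constructor
  · rintro ⟨a, ⟨ha0, halt⟩, b, ⟨hab, hblt⟩, hx⟩
    have hb0 : 0 ≤ b := by omega
    have hant : a.toNat < lst.length := by omega
    have hbnt : b.toNat < lst.length := by omega
    rw [PySem.List.pyGetD_of_nonneg _ _ ha0, PySem.List.pyGetD_of_nonneg _ _ hb0,
      List.getD_eq_getElem _ _ hant, List.getD_eq_getElem _ _ hbnt] at hx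
    have h1 : i = lst[a.toNat] := congrArg Prod.fst hx
    have h2 : j = lst[b.toNat] := congrArg Prod.snd hx
    rw [h1, h2]
    exact ⟨List.getElem_mem _, List.getElem_mem _⟩
  · rintro ⟨hi, hj⟩
    obtain ⟨ai, hai, hgi⟩ := List.mem_iff_getElem.mp hi
    obtain ⟨bj, hbj, hgj⟩ := List.mem_iff_getElem.mp hj
    have hab : ai < bj := by
      rcases lt_trichotomy ai bj with h | h | h
      · exact h
      · exfalso
        subst h
        rw [hgi] at hgj
        omega
      · exfalso
        have := hs bj ai hbj hai h
        rw [hgi, hgj] at this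
        omega
    refine ⟨(ai : Int), ⟨Int.natCast_nonneg _, by exact_mod_cast hai⟩,
      (bj : Int), ⟨by omega, by exact_mod_cast hbj⟩, ?_⟩
    rw [PySem.List.pyGetD_of_nonneg _ _ (Int.natCast_nonneg _),
      PySem.List.pyGetD_of_nonneg _ _ (Int.natCast_nonneg _)]
    simp only [Int.toNat_natCast]
    rw [List.getD_eq_getElem _ _ hai, List.getD_eq_getElem _ _ hbj, hgi, hgj]

lemma conflict_iff (c : List (String × List Int)) (h : ∀ p ∈ c, p.2.Nodup) (i j : Int) (hij : i < j) :
    ((i, j) ∈ pvConflict c) ↔ ∃ e, i ∈ pvPost c e ∧ j ∈ pvPost c e := by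
  rw [mem_conflict]
  constructor
  · rintro ⟨lst, hlst, hpair⟩
    obtain ⟨e, rfl⟩ := values_mem_iff c h hlst
    have := (pair_mem_sorted _ (sorted_post c e) i j hij).mp hpair
    exact ⟨e, this.1, this.2⟩
  · rintro ⟨e, hi, hj⟩
    have hne : pvPost c e ≠ [] := List.ne_nil_of_mem hi
    exact ⟨pvPost c e, post_mem_values c h e hne,
      (pair_mem_sorted _ (sorted_post c e) i j hij).mpr ⟨hi, hj⟩⟩

lemma isdisjoint_false_iff (s t : List Int) : pyIsdisjoint s t = false ↔ ∃ e ∈ s, e ∈ t := by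
  simp [pyIsdisjoint]

lemma key_at (c : List (String × List Int)) (i : Int) (h0 : 0 ≤ i) (hi : i < (c.length : Int)) :
    PySem.List.pyGetD (c.map Prod.fst) i "" = (c.getD i.toNat ("", [])).1 := by
  have hk : i.toNat < c.length := by omega
  rw [PySem.List.pyGetD_of_nonneg _ _ h0, List.getD_eq_getElem _ _ (by simpa using hk),
    List.getD_eq_getElem _ _ hk]
  simp

lemma lookup_at (c : List (String × List Int)) (hk : (c.map Prod.fst).Nodup) (i : Int)
    (h0 : 0 ≤ i) (hi : i < (c.length : Int)) :
    (PySem.Dict.mk c).getD (PySem.List.pyGetD (c.map Prod.fst) i "") [] = (c.getD i.toNat ("", [])).2 := by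
  have hnt : i.toNat < c.length := by omega
  rw [key_at c i h0 hi]
  have hmem : ((c.getD i.toNat ("", [])).1, (c.getD i.toNat ("", [])).2) ∈ (PySem.Dict.mk c).items := by
    show ((c.getD i.toNat ("", [])).1, (c.getD i.toNat ("", [])).2) ∈ c
    rw [List.getD_eq_getElem _ _ hnt]
    exact List.getElem_mem hnt
  exact PySem.Dict.getD_of_mem_items _ hmem (by simpa [PySem.Dict.keys] using hk) []

lemma cond_eq (c : List (String × List Int)) (hk : (c.map Prod.fst).Nodup)
    (hv : ∀ p ∈ c, p.2.Nodup) (i j : Int) (h0 : 0 ≤ i) (hij : i < j) (hj : j < (c.length : Int)) :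
    (!(PySem.Set.contains (pvConflict c) (i, j)))
      = pyIsdisjoint ((PySem.Dict.mk c).getD (PySem.List.pyGetD (c.map Prod.fst) i "") [])
          ((PySem.Dict.mk c).getD (PySem.List.pyGetD (c.map Prod.fst) j "") []) := by
  rw [lookup_at c hk i h0 (by omega), lookup_at c hk j (by omega) hj]
  have hmem : ((i, j) ∈ pvConflict c) ↔
      ∃ e ∈ (c.getD i.toNat ("", [])).2, e ∈ (c.getD j.toNat ("", [])).2 := by
    rw [conflict_iff c hv i j hij]
    constructor
    · rintro ⟨e, hi', hj'⟩
      rw [mem_post] at hi' hj'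
      exact ⟨e, hi'.2.2, hj'.2.2⟩
    · rintro ⟨e, he1, he2⟩
      exact ⟨e, (mem_post c e i).mpr ⟨h0, by omega, he1⟩, (mem_post c e j).mpr ⟨by omega, hj, he2⟩⟩
  cases hd : pyIsdisjoint (c.getD i.toNat ("", [])).2 (c.getD j.toNat ("", [])).2 with
  | false =>
    have hin : (i, j) ∈ pvConflict c := hmem.mpr ((isdisjoint_false_iff _ _).mp hd)
    have hc : PySem.Set.contains (pvConflict c) (i, j) = true := by
      rw [PySem.Set.contains_iff]; exact hin
    rw [hc]; rfl
  | true =>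
    have hnm : (i, j) ∉ pvConflict c := by
      intro hcon
      obtain ⟨e, he1, he2⟩ := hmem.mp hcon
      have hfalse := (isdisjoint_false_iff _ _).mpr ⟨e, he1, he2⟩
      rw [hd] at hfalse
      exact Bool.noConfusion hfalse
    have hc : PySem.Set.contains (pvConflict c) (i, j) = false := by
      cases hcb : PySem.Set.contains (pvConflict c) (i, j) with
      | false => rfl
      | true =>
        rw [PySem.Set.contains_iff] at hcb
        exact absurd hcb hnm
    rw [hc]; rfl

-- ===== VERDICT (by name: the statement is the Claim_ definition above) =====
theorem hay_conjuntos_completamente_diferentes_spec : Claim_equal_hay_conjuntos_completamente_diferentes := by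
  intro c _ hpre
  obtain ⟨hk, hv⟩ := hpre
  unfold Spec_hay_conjuntos_completamente_diferentes
  show (PySem.List.pyRange 0 (((c.map Prod.fst).length : Nat) : Int) 1).foldl (fun resultados i =>
      (PySem.List.pyRange (i + 1) (((c.map Prod.fst).length : Nat) : Int) 1).foldl (fun resultados j =>
        if pyIsdisjoint ((PySem.Dict.mk c).getD (PySem.List.pyGetD (c.map Prod.fst) i "") [])
            ((PySem.Dict.mk c).getD (PySem.List.pyGetD (c.map Prod.fst) j "") []) then
          resultados ++ [(PySem.List.pyGetD (c.map Prod.fst) i "", PySem.List.pyGetD (c.map Prod.fst) j "")]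
        else resultados) resultados) []
    = (PySem.List.pyRange 0 ((c.length : Nat) : Int) 1).foldl (fun resultados i =>
      (PySem.List.pyRange (i + 1) ((c.length : Nat) : Int) 1).foldl (fun resultados j =>
        if !(PySem.Set.contains (pvConflict c) (i, j)) then
          resultados ++ [((PySem.List.pyGetD c i ("", [])).1, (PySem.List.pyGetD c j ("", [])).1)]
        else resultados) resultados) []
  rw [List.length_map]
  apply PySem.List.foldl_congr_mem
  intro acc i hi
  apply PySem.List.foldl_congr_mem
  intro acc' j hj
  rw [PySem.List.mem_pyRange_one] at hi hj
  rw [← cond_eq c hk hv i j hi.1 (by omega) hj.2]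
  rw [key_at c i hi.1 (by omega), key_at c j (by omega) hj.2]
  rw [PySem.List.pyGetD_of_nonneg c ("", []) hi.1,
    PySem.List.pyGetD_of_nonneg c ("", []) (show (0:Int) ≤ j by omega)]
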